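-- pv_equiv track=rewrite | github.com/OddmarRune/adventofcode | 2023/Dec14/dec14.py | load
-- ===== SOURCE A (Python) =====
-- def load(disc):
--     """Calculate load"""
--     total = 0
--     for r, line in enumerate(disc):
--         c = 0
--         for element in line:
--             if element == 'O':
--                 c += 1
--         total += (len(disc)-r)*c
--     return total
-- ===== SOURCE B (Python) =====
-- def load(disc):
--     """Calculate load"""
--     running = 0
--     total = 0
--     for line in disc:
--         c = 0
--         for element in line:
--             if element == 'O':
--                 c += 1
--         running += c
--         total += running
--     return total
-- ===== Notes on version B (the rewrite author's own statement) =====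
-- stated objective: alternative
-- what changed: Replaces the per-row (len(disc)-r)*count weighting (which needs the row index and the list length) by a prefix-sum accumulator: each row's O-count is added to a running total, and the running total is added to the grand total each row, so row r is counted len(disc)-r times without ever multiplying or indexing.
import Mathlib
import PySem

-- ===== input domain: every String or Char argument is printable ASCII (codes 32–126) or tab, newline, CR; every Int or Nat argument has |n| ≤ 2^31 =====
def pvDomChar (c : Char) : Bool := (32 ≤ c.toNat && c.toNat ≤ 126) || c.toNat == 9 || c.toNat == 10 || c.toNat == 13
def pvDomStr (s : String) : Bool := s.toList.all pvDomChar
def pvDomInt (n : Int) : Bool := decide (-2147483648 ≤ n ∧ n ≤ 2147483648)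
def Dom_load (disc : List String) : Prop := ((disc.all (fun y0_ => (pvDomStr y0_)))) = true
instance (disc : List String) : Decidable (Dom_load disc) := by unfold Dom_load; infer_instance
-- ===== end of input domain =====

-- B replaces A's index-based weighting (len(disc)-r)*count by a prefix-sum accumulator; alternative decomposition, same cost.

-- ===== PORT A =====
-- inner per-row loop: count of 'O' characters (shared verbatim by both Pythons)
def countO (line : String) : Int :=
  line.toList.foldl (fun c element => if element = 'O' then c + 1 else c) 0

def load (disc : List String) : Int :=
  (PySem.List.enumerate disc 0).foldl
    (fun total rl => total + ((disc.length : Int) - rl.1) * countO rl.2) 0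

-- ===== PORT B =====
def load_alt (disc : List String) : Int :=
  (disc.foldl (fun st line =>
      let run := st.1 + countO line
      (run, st.2 + run)) ((0 : Int), (0 : Int))).2

-- ===== PRECONDITION & SPEC =====
def Spec_load (disc : List String) (out : Int) : Prop := out = load_alt disc
instance (disc : List String) (out : Int) : Decidable (Spec_load disc out) := by unfold Spec_load; infer_instance

-- ===== CLAIM (what is proved, stated in full; the proofs are below) =====
def Claim_equal_load : Prop := ∀ (disc : List String), Dom_load disc → Spec_load disc (load disc)

-- ===== LEMMAS AND PROOFS =====

-- canonical weighted sum: weights m, m-1, … down the rows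
def sumW : List String → Int → Int
  | [], _ => 0
  | x :: xs, m => m * countO x + sumW xs (m - 1)

theorem loadA_aux (xs : List String) (n : Int) : ∀ (s t : Int),
    (PySem.List.enumerate xs s).foldl
      (fun total rl => total + (n - rl.1) * countO rl.2) t
    = t + sumW xs (n - s) := by
  induction xs with
  | nil => intro s t; simp [PySem.List.enumerate_nil, sumW]
  | cons x xs ih =>
    intro s t
    rw [PySem.List.enumerate_cons]
    have h : n - (s + 1) = n - s - 1 := by ring
    simp only [List.foldl_cons, ih (s + 1), sumW, h]
    ring

theorem loadB_aux (xs : List String) : ∀ (a t : Int),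
    (xs.foldl (fun st line =>
        let run := st.1 + countO line
        (run, st.2 + run)) (a, t)).2
    = t + a * (xs.length : Int) + sumW xs (xs.length : Int) := by
  induction xs with
  | nil => intro a t; simp [sumW]
  | cons x xs ih =>
    intro a t
    simp only [List.foldl_cons, ih, sumW, List.length_cons]
    have h : ((xs.length : Int) + 1) - 1 = (xs.length : Int) := by ring
    push_cast [h]
    ring

-- ===== VERDICT (by name: the statement is the Claim_ definition above) =====
theorem load_spec : Claim_equal_load := by
  intro disc _
  unfold Spec_load load load_alt
  rw [loadA_aux, loadB_aux]
  norm_num
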